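-- pv_equiv track=rewrite | github.com/PWrWhiteHats/BtS-2024-Writeups | crypto/letter/writeup/solve.py | sub_mod
-- ===== SOURCE A (Python) =====
-- from string import ascii_uppercase, digits
--
-- alphabet = ascii_uppercase + digits
--
-- def sub_mod(ct1, key_x):
--     ct2 = ""
--     i = 0
--     for c in ct1:
--         if c in alphabet:
--             ix = (alphabet.index(c) - alphabet.index(key_x[i % len(key_x)])) % len(alphabet)
--             ct2 += alphabet[ix]
--             i += 1
--         else:
--             ct2 += c
--     return ct2
-- ===== SOURCE B (Python) =====
-- from string import ascii_uppercase, digits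
--
-- alphabet = ascii_uppercase + digits
--
-- def sub_mod(ct1, key_x):
--     # three passes: collect the alphabet letters, decrypt them, then merge
--     # them back with the untouched characters.
--     letters = [c for c in ct1 if c in alphabet]
--     dec = []
--     j = 0
--     for c in letters:
--         dec.append(alphabet[(alphabet.index(c) - alphabet.index(key_x[j % len(key_x)])) % len(alphabet)])
--         j += 1
--     out = []
--     k = 0
--     for c in ct1:
--         if c in alphabet:
--             out.append(dec[k])
--             k += 1
--         else:
--             out.append(c)
--     return "".join(out)
-- ===== Notes on version B (the rewrite author's own statement) =====
-- stated objective: alternative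
-- what changed: A's single interleaved loop carrying a growing string and a key counter is split into three passes: collect the alphabet letters, decrypt the collected list pairing the j-th letter with key_x[j % len(key_x)], then merge the decrypted letters back into the original positions.
import Mathlib
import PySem

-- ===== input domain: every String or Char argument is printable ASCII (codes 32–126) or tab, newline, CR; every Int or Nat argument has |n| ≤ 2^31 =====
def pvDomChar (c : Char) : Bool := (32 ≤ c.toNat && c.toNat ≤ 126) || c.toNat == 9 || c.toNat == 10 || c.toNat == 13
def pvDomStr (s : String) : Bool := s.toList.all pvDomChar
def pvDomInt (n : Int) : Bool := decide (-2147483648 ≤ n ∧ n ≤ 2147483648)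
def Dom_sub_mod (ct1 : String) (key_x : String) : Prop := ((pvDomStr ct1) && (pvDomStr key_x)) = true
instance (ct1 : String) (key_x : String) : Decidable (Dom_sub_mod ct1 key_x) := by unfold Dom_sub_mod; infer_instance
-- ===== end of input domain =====

-- B replaces A's single interleaved loop by collect/decrypt/merge passes (objective: alternative decomposition, same cost).

-- alphabet = ascii_uppercase + digits  (36 distinct chars; 'c in alphabet' for a single char = list membership)
def pvAlph : List Char := "ABCDEFGHIJKLMNOPQRSTUVWXYZ0123456789".toList

-- ===== PORT A =====
-- one loop step: Python's body for one character c; the counter i is st.2.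
-- key_x[i % len(key_x)]: i % len is a nonnegative index, so List getElem? is exact;
-- with len = 0 Python raises ZeroDivisionError — the `none` guard (excluded by Pre_).
-- alphabet.index → PySem.List.index? (none = ValueError, excluded by Pre_).
def pvStepA (key : List Char) (st : List Char × Nat) (c : Char) : List Char × Nat :=
  if c ∈ pvAlph then
    match key[st.2 % key.length]? with
    | none => st
    | some k =>
      match PySem.List.index? pvAlph c with
      | none => st
      | some ic =>
        match PySem.List.index? pvAlph k with
        | none => st
        | some ik =>
          match PySem.List.pyGet? pvAlph (PySem.Int.mod ((ic : Int) - (ik : Int)) ((pvAlph.length : Nat) : Int)) with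
          | none => st
          | some d => (st.1 ++ [d], st.2 + 1)
  else (st.1 ++ [c], st.2)

def sub_mod (ct1 : String) (key_x : String) : String :=
  String.ofList (ct1.toList.foldl (pvStepA key_x.toList) ([], 0)).1

-- ===== PORT B =====
-- decrypt one collected letter c paired with key index j (same guards as above).
def pvEnc (key : List Char) (j : Nat) (c : Char) : Char :=
  match key[j % key.length]? with
  | none => c
  | some k =>
    match PySem.List.index? pvAlph c, PySem.List.index? pvAlph k with
    | some ic, some ik =>
        (PySem.List.pyGet? pvAlph (PySem.Int.mod ((ic : Int) - (ik : Int)) ((pvAlph.length : Nat) : Int))).getD c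
    | _, _ => c

-- pass 2 of B: the `for c in letters: dec.append(...); j += 1` loop
def pvDec (key : List Char) : List Char → Nat → List Char
  | [], _ => []
  | c :: cs, j => pvEnc key j c :: pvDec key cs (j + 1)

-- pass 3 of B: merge decrypted letters back; ds is never exhausted while an
-- alphabet char remains (dec has one entry per alphabet char), `[]` is a guard.
def pvMerge : List Char → List Char → List Char
  | [], _ => []
  | c :: cs, ds =>
    if c ∈ pvAlph then
      match ds with
      | d :: ds' => d :: pvMerge cs ds'
      | [] => c :: pvMerge cs []
    else c :: pvMerge cs ds

def sub_mod_alt (ct1 : String) (key_x : String) : String :=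
  let key := key_x.toList
  let letters := ct1.toList.filter (fun c => decide (c ∈ pvAlph))
  String.ofList (pvMerge ct1.toList (pvDec key letters 0))

-- ===== PRECONDITION & SPEC =====
-- Pre_ excludes exactly the inputs where A raises: ZeroDivisionError when key_x is
-- empty but an alphabet char occurs, ValueError when an actually-indexed key char
-- (positions 0..min(n,len)-1, n = number of alphabet chars of ct1) is outside the
-- alphabet. B raises the same exceptions there.
def Pre_sub_mod (ct1 : String) (key_x : String) : Prop :=
  (ct1.toList.filter (fun c => decide (c ∈ pvAlph))).length = 0 ∨
    (key_x.toList ≠ [] ∧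
      ((key_x.toList.take ((ct1.toList.filter (fun c => decide (c ∈ pvAlph))).length)).all
        (fun c => decide (c ∈ pvAlph))) = true)
instance (ct1 : String) (key_x : String) : Decidable (Pre_sub_mod ct1 key_x) := by
  unfold Pre_sub_mod; infer_instance

def pvWitness_sub_mod : String × String := ("A1!", "B")

def Spec_sub_mod (ct1 : String) (key_x : String) (out : String) : Prop := out = sub_mod_alt ct1 key_x
instance (ct1 : String) (key_x : String) (out : String) : Decidable (Spec_sub_mod ct1 key_x out) := by unfold Spec_sub_mod; infer_instance

-- ===== CLAIM (what is proved, stated in full; the proofs are below) =====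
def Claim_equal_sub_mod : Prop := ∀ (ct1 : String) (key_x : String), Dom_sub_mod ct1 key_x → Pre_sub_mod ct1 key_x → Spec_sub_mod ct1 key_x (sub_mod ct1 key_x)

-- ===== LEMMAS AND PROOFS =====

-- main invariant: A's fold from counter i equals merge of B's decryption from j = i,
-- provided every key char actually indexed from position i on is in the alphabet.
lemma pv_fold_eq (key : List Char) :
    ∀ (cs : List Char) (i : Nat) (acc : List Char),
    (∀ j, i ≤ j → j < i + (cs.filter (fun c => decide (c ∈ pvAlph))).length →
        ∃ k, key[j % key.length]? = some k ∧ k ∈ pvAlph) →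
    (cs.foldl (pvStepA key) (acc, i)).1
      = acc ++ pvMerge cs (pvDec key (cs.filter (fun c => decide (c ∈ pvAlph))) i) := by
  intro cs
  induction cs with
  | nil => intro i acc _; simp [pvMerge]
  | cons c cs ih =>
    intro i acc h
    by_cases hc : c ∈ pvAlph
    · have hfil : (c :: cs).filter (fun c => decide (c ∈ pvAlph))
          = c :: cs.filter (fun c => decide (c ∈ pvAlph)) := by simp [hc]
      obtain ⟨k, hk, hkA⟩ := h i le_rfl (by rw [hfil]; simp)
      obtain ⟨ic, hic⟩ := Option.isSome_iff_exists.mp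
        ((PySem.List.index?_isSome_iff (xs := pvAlph) (v := c)).mpr hc)
      obtain ⟨ik, hik⟩ := Option.isSome_iff_exists.mp
        ((PySem.List.index?_isSome_iff (xs := pvAlph) (v := k)).mpr hkA)
      set m : Int := PySem.Int.mod ((ic : Int) - (ik : Int)) ((pvAlph.length : Nat) : Int) with hm
      have hlen : (0 : Int) < ((pvAlph.length : Nat) : Int) := by decide
      have hm0 : 0 ≤ m := PySem.Int.mod_nonneg _ hlen
      have hmlt : m < (pvAlph.length : Int) := PySem.Int.mod_lt _ hlen
      have hd : PySem.List.pyGet? pvAlph m = some pvAlph[m.toNat] :=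
        PySem.List.pyGet?_eq_some_getElem pvAlph hm0 hmlt
      have hd' : PySem.List.pyGet? pvAlph
          (PySem.Int.mod ((ic : Int) - (ik : Int)) ((pvAlph.length : Nat) : Int))
          = some pvAlph[m.toNat] := hd
      have hstep : pvStepA key (acc, i) c = (acc ++ [pvAlph[m.toNat]], i + 1) := by
        simp only [pvStepA, if_pos hc, hk, hic, hik, hd']
      have henc : pvEnc key i c = pvAlph[m.toNat] := by
        simp only [pvEnc, hk, hic, hik, hd', Option.getD_some]
      rw [List.foldl_cons, hstep, hfil, pvDec, henc]
      have hmerge : pvMerge (c :: cs)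
          (pvAlph[m.toNat] :: pvDec key (cs.filter (fun c => decide (c ∈ pvAlph))) (i + 1))
          = pvAlph[m.toNat] :: pvMerge cs (pvDec key (cs.filter (fun c => decide (c ∈ pvAlph))) (i + 1)) := by
        simp [pvMerge, hc]
      rw [hmerge, ih (i + 1) (acc ++ [pvAlph[m.toNat]]) ?_]
      · simp
      · intro j hj1 hj2
        refine h j (by omega) ?_
        rw [hfil]; simp; omega
    · have hfil : (c :: cs).filter (fun c => decide (c ∈ pvAlph))
          = cs.filter (fun c => decide (c ∈ pvAlph)) := by simp [hc]
      have hstep : pvStepA key (acc, i) c = (acc ++ [c], i) := by simp [pvStepA, hc]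
      have hmerge : ∀ ds, pvMerge (c :: cs) ds = c :: pvMerge cs ds := by
        intro ds; cases ds <;> simp [pvMerge, hc]
      rw [List.foldl_cons, hstep, hfil, hmerge,
        ih i (acc ++ [c]) (by rw [hfil] at h; exact h)]
      simp

-- ===== VERDICT (by name: the statement is the Claim_ definition above) =====
theorem sub_mod_spec : Claim_equal_sub_mod := by
  intro ct1 key_x _ hpre
  unfold Spec_sub_mod sub_mod sub_mod_alt
  set key := key_x.toList with hkey
  set n := (ct1.toList.filter (fun c => decide (c ∈ pvAlph))).length with hn
  have hmain : ∀ j, 0 ≤ j → j < 0 + n → ∃ k, key[j % key.length]? = some k ∧ k ∈ pvAlph := by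
    intro j _ hj
    rcases hpre with h0 | ⟨hne, hall0⟩
    · omega
    · have hall : ∀ c ∈ key_x.toList.take n, c ∈ pvAlph := by
        intro c hcm
        simpa using List.all_eq_true.mp hall0 c (by rw [← hn]; exact hcm)
      have hklen : 0 < key.length := List.length_pos_iff.mpr hne
      have hp : j % key.length < key.length := Nat.mod_lt _ hklen
      refine ⟨key[j % key.length], List.getElem?_eq_getElem hp, ?_⟩
      refine hall _ ?_
      have hpn : j % key.length < n := lt_of_le_of_lt (Nat.mod_le _ _) (by omega)
      have : (key.take n)[j % key.length]'(by simp; omega) = key[j % key.length] :=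
        List.getElem_take
      rw [← this]
      exact List.getElem_mem _
  have := pv_fold_eq key ct1.toList 0 [] (by rw [← hn]; exact hmain)
  rw [this]
  simp
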